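-- pv_equiv track=rewrite | github.com/Karthiikeyan/Strivers-SDE-Sheet-Challenge | 154. Count Distinct Element in Every K Size Window.py | countDistinctElements
-- ===== SOURCE A (Python) =====
-- def countDistinctElements(arr, k):
--     # Write your code here
--     n = len(arr)
--     l = []
--     for i in range(k,n+1):
--         ans = len(list(set(arr[i-k:i])))
--         l.append(ans)
--     return l
--
--     pass
-- ===== SOURCE B (Python) =====
-- def countDistinctElements(arr, k):
--     # O(n) sliding window: maintain a running count map and a distinct counter.
--     n = len(arr)
--     counts = {}
--     distinct = 0
--     res = []
--     for i in range(n):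
--         a = arr[i]
--         c = counts.get(a, 0)
--         if c == 0:
--             distinct += 1
--         counts[a] = c + 1
--         if i >= k:
--             y = arr[i - k]
--             c2 = counts.get(y, 0) - 1
--             counts[y] = c2
--             if c2 == 0:
--                 distinct -= 1
--         if i >= k - 1:
--             res.append(distinct)
--     return res
-- ===== Notes on version B (the rewrite author's own statement) =====
-- stated objective: faster
-- what changed: Replaces the per-window set construction (rebuilding set(arr[i-k:i]) for every window, O(n*k)) by a single sliding-window pass that maintains a hashmap of element counts and a running distinct counter, O(n).
-- outside the precondition, e.g. on countDistinctElements([1, 2], 0): A returns [0, 0, 0], B returns [0, 0]; on countDistinctElements([1, 2], -1): A returns [1, 0, 0, 0], B raises IndexError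
import Mathlib
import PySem

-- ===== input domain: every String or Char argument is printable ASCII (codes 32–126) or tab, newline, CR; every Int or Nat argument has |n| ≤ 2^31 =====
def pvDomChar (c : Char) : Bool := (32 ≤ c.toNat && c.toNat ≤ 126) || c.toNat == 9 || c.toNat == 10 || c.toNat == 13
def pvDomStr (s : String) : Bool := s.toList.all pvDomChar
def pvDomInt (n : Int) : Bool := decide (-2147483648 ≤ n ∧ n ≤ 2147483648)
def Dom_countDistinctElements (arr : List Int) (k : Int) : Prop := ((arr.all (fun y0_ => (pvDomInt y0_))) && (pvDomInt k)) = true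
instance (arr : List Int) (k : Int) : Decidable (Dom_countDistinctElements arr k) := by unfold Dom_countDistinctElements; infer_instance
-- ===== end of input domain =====

-- B replaces A's per-window set rebuild by a single sliding-window pass that keeps a
-- running count map and distinct counter (objective: faster; measured asymptotically).

-- ===== PORT A =====
-- A: for i in range(k, n+1): l.append(len(list(set(arr[i-k:i]))))
def countDistinctElements (arr : List Int) (k : Int) : List Int :=
  let n : Int := PySem.List.len arr
  (PySem.List.pyRange k (n + 1) 1).foldl
    (fun l i =>
      let ans : Int := ((PySem.Set.ofList (PySem.List.slice arr (some (i - k)) (some i))).length : Int)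
      l ++ [ans]) []

-- ===== PORT B =====
-- B-side helper: the body of B's single for-loop over i in range(n)
def pvBStep (arr : List Int) (k : Int) (st : PySem.Dict Int Int × Int × List Int) (i : Int) :
    PySem.Dict Int Int × Int × List Int :=
  let counts := st.1
  let distinct := st.2.1
  let res := st.2.2
  let a := PySem.List.pyGetD arr i 0            -- arr[i]: i ∈ range(n) is always in range
  let c := counts.getD a 0
  let distinct := if c == 0 then distinct + 1 else distinct
  let counts := counts.insert a (c + 1)
  let cd :=
    if k ≤ i then
      let y := PySem.List.pyGetD arr (i - k) 0  -- arr[i-k]: in range under Pre_ (1 ≤ k)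
      let c2 := counts.getD y 0 - 1
      (counts.insert y c2, if c2 == 0 then distinct - 1 else distinct)
    else (counts, distinct)
  let res := if k - 1 ≤ i then res ++ [cd.2] else res
  (cd.1, cd.2, res)

def countDistinctElements_alt (arr : List Int) (k : Int) : List Int :=
  let n : Int := PySem.List.len arr
  ((PySem.List.pyRange 0 n 1).foldl (pvBStep arr k) (PySem.Dict.empty, 0, [])).2.2

-- ===== PRECONDITION & SPEC =====
-- Pre_ excludes nonpositive window sizes k ≤ 0, on which A's list of zero counts for
-- degenerate empty slices is an accident of Python slice semantics (and B may raise).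
def Pre_countDistinctElements (arr : List Int) (k : Int) : Prop := 1 ≤ k
instance (arr : List Int) (k : Int) : Decidable (Pre_countDistinctElements arr k) := by unfold Pre_countDistinctElements; infer_instance
def pvWitness_countDistinctElements : List Int × Int := ([1, 2, 1], 2)
def Spec_countDistinctElements (arr : List Int) (k : Int) (out : List Int) : Prop := out = countDistinctElements_alt arr k
instance (arr : List Int) (k : Int) (out : List Int) : Decidable (Spec_countDistinctElements arr k out) := by unfold Spec_countDistinctElements; infer_instance

-- ===== CLAIM (what is proved, stated in full; the proofs are below) =====
def Claim_equal_countDistinctElements : Prop := ∀ (arr : List Int) (k : Int), Dom_countDistinctElements arr k → Pre_countDistinctElements arr k → Spec_countDistinctElements arr k (countDistinctElements arr k)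

-- ===== LEMMAS AND PROOFS =====

-- number of distinct elements of a list, as Python's len(list(set(w)))
def pvNdist (w : List Int) : Int := ((PySem.Set.ofList w).length : Int)

lemma pv_length_discard (s : List Int) (h : s.Nodup) (y : Int) :
    ((PySem.Set.discard s y).length : Int) = (s.length : Int) - (if y ∈ s then 1 else 0) := by
  unfold PySem.Set.discard
  by_cases hy : y ∈ s
  · have hf : s.filter (fun z => !z == y) = s.erase y := by
      rw [List.Nodup.erase_eq_filter h]
      apply List.filter_congr; intro a _; simp [bne]
    rw [hf, List.length_erase_of_mem hy]
    have : 1 ≤ s.length := List.length_pos_of_mem hy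
    simp [hy]; omega
  · have hf : s.filter (fun z => !z == y) = s := by
      apply List.filter_eq_self.mpr
      intro a ha; simp; rintro rfl; exact hy ha
    simp [hf, hy]

lemma pv_ndist_append (w : List Int) (x : Int) :
    pvNdist (w ++ [x]) = pvNdist w + (if x ∈ w then 0 else 1) := by
  unfold pvNdist
  rw [PySem.Set.ofList_append_singleton, PySem.Set.add_eq_ite]
  by_cases hx : x ∈ w
  · simp [PySem.Set.mem_ofList, hx]
  · simp [PySem.Set.mem_ofList, hx]

lemma pv_ndist_cons (y : Int) (u : List Int) :
    pvNdist (y :: u) = pvNdist u + (if y ∈ u then 0 else 1) := by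
  unfold pvNdist
  rw [PySem.Set.ofList_cons]
  have hnd := PySem.Set.nodup_ofList (α := Int) u
  have hd := pv_length_discard (PySem.Set.ofList u) hnd y
  simp only [List.length_cons]
  push_cast
  rw [hd]
  by_cases hy : y ∈ u
  · have h1 : 1 ≤ (PySem.Set.ofList u).length :=
      List.length_pos_of_mem ((PySem.Set.mem_ofList u y).mpr hy)
    simp [PySem.Set.mem_ofList, hy]
  · simp [PySem.Set.mem_ofList, hy]

lemma pv_A_eq (arr : List Int) (kn : Nat) :
    countDistinctElements arr (kn : Int) =
      (List.range (arr.length + 1 - kn)).map (fun j => pvNdist ((arr.drop j).take kn)) := by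
  unfold countDistinctElements
  simp only [PySem.List.len_eq]
  rw [PySem.List.foldl_append_singleton_eq_map, PySem.List.pyRange_one, List.map_map]
  have h1 : ((arr.length : Int) + 1 - (kn : Int)).toNat = arr.length + 1 - kn := by omega
  rw [h1, List.nil_append]
  apply List.map_congr_left
  intro j _
  simp only [Function.comp]
  have h2 : (kn : Int) + (j : Int) - (kn : Int) = (j : Int) := by ring
  have h3 : (kn : Int) + (j : Int) = (j : Int) + (kn : Int) := by ring
  rw [h2, h3, PySem.List.slice_natCast_add]
  rfl

lemma pv_win_succ_lt (arr : List Int) (kn m : Nat) (hm : m < arr.length) (h : m < kn) :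
    (arr.take (m+1)).drop (m+1-kn) = ((arr.take m).drop (m-kn)) ++ [arr[m]] := by
  have h1 : m+1-kn = 0 := by omega
  have h2 : m-kn = 0 := by omega
  rw [h1, h2, List.drop_zero, List.drop_zero, List.take_add_one, List.getElem?_eq_getElem hm]
  rfl

lemma pv_win_cons (arr : List Int) (kn m : Nat) (hk : 1 ≤ kn) (h : kn ≤ m) (hm : m < arr.length) :
    (arr.take m).drop (m-kn) = arr[m-kn]'(by omega) :: (arr.take m).drop (m-kn+1) := by
  have hlt : m - kn < (arr.take m).length := by
    rw [List.length_take]; omega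
  rw [List.drop_eq_getElem_cons hlt]
  congr 1
  simp [List.getElem_take]

lemma pv_win_succ_ge (arr : List Int) (kn m : Nat) (hk : 1 ≤ kn) (h : kn ≤ m) (hm : m < arr.length) :
    (arr.take (m+1)).drop (m+1-kn) = (arr.take m).drop (m-kn+1) ++ [arr[m]] := by
  have h1 : m+1-kn = m-kn+1 := by omega
  rw [h1, List.take_add_one, List.getElem?_eq_getElem hm]
  have h2 : m-kn+1 ≤ (arr.take m).length := by rw [List.length_take]; omega
  rw [List.drop_append_of_le_length h2]
  rfl

lemma pv_win_take_drop (arr : List Int) (kn m : Nat) (h : kn ≤ m) :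
    (arr.take m).drop (m-kn) = (arr.drop (m-kn)).take kn := by
  rw [List.drop_take]
  congr 1
  omega

lemma pv_B_loop (arr : List Int) (kn : Nat) (hk : 1 ≤ kn) (m : Nat) (hm : m ≤ arr.length) :
    ∃ C : PySem.Dict Int Int,
      (PySem.List.pyRange 0 (m : Int) 1).foldl (pvBStep arr (kn : Int)) (PySem.Dict.empty, 0, []) =
        (C, pvNdist ((arr.take m).drop (m - kn)),
          (List.range (m + 1 - kn)).map (fun j => pvNdist ((arr.drop j).take kn)))
      ∧ ∀ v : Int, C.getD v 0 = (((arr.take m).drop (m - kn)).count v : Int) := by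
  induction m with
  | zero =>
    refine ⟨PySem.Dict.empty, ?_, ?_⟩
    · have h0 : (1 : Nat) - kn = 0 := by omega
      rw [show ((0:Nat):Int) = (0:Int) from rfl, PySem.List.pyRange_one_eq_nil le_rfl]
      simp [h0, pvNdist, PySem.Set.ofList]
    · intro v; simp
  | succ m ih =>
    have hmlt : m < arr.length := by omega
    obtain ⟨C, heq, hC⟩ := ih (by omega)
    have hr : PySem.List.pyRange 0 ((m+1 : Nat) : Int) 1 =
        PySem.List.pyRange 0 (m : Int) 1 ++ [(m : Int)] := by
      push_cast
      exact PySem.List.pyRange_one_succ_right (by positivity)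
    rw [hr, List.foldl_append, heq, List.foldl_cons, List.foldl_nil]
    simp only [pvBStep]
    rw [PySem.List.pyGetD_natCast, List.getD_eq_getElem arr 0 hmlt]
    set a := arr[m] with ha
    set W := (arr.take m).drop (m - kn) with hW
    rw [hC a]
    by_cases hcase : kn ≤ m
    · -- removal branch taken
      have hif1 : ((kn : Int) ≤ (m : Int)) = True := by simp; exact_mod_cast hcase
      have hif2 : ((kn : Int) - 1 ≤ (m : Int)) = True := by simp; omega
      simp only [hif1, hif2, if_true]
      have hy : PySem.List.pyGetD arr ((m:Int) - (kn:Int)) 0 = arr[m - kn]'(by omega) := by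
        rw [show (m:Int) - (kn:Int) = ((m - kn : Nat) : Int) by omega, PySem.List.pyGetD_natCast]
        exact List.getD_eq_getElem arr 0 (by omega)
      rw [hy]
      have hins : ∀ v : Int, (C.insert a ((W.count a : Int) + 1)).getD v 0 = ((W ++ [a]).count v : Int) := by
        intro v
        rw [PySem.Dict.getD_insert]
        by_cases hv : v = a
        · subst hv; simp [List.count_append]
        · have h1 : ([a].count v) = 0 := by
            simp [List.count_singleton]
            exact fun h => hv h.symm
          simp [hv, hC v, List.count_append, h1]
      rw [hins]
      have hWT : W = arr[m - kn]'(by omega) :: (arr.take m).drop (m - kn + 1) :=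
        pv_win_cons arr kn m hk hcase hmlt
      have hWa : W ++ [a] = arr[m - kn]'(by omega) :: ((arr.take m).drop (m - kn + 1) ++ [a]) := by
        rw [hWT]; rfl
      have hcnt : ((W ++ [a]).count (arr[m - kn]'(by omega)) : Int) - 1 =
          (((arr.take m).drop (m - kn + 1) ++ [a]).count (arr[m - kn]'(by omega)) : Int) := by
        rw [hWa, List.count_cons]
        push_cast
        simp
      rw [hcnt]
      have hd1 : (if ((W.count a : Int) == 0) = true then pvNdist W + 1 else pvNdist W) = pvNdist (W ++ [a]) := by
        rw [pv_ndist_append]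
        by_cases hmem : a ∈ W
        · have h1 : W.count a ≠ 0 := by
            have := List.count_pos_iff.mpr hmem; omega
          have h2 : ((W.count a : Int) == 0) = false := by
            rw [beq_eq_false_iff_ne]
            exact_mod_cast h1
          simp [h2, hmem]
        · have h1 : W.count a = 0 := List.count_eq_zero.mpr hmem
          simp [h1, hmem]
      rw [hd1]
      have hd2 : (if ((((arr.take m).drop (m - kn + 1) ++ [a]).count (arr[m - kn]'(by omega)) : Int) == 0) = true
            then pvNdist (W ++ [a]) - 1 else pvNdist (W ++ [a])) =
          pvNdist ((arr.take m).drop (m - kn + 1) ++ [a]) := by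
        have hsplit : pvNdist (W ++ [a]) = pvNdist ((arr.take m).drop (m - kn + 1) ++ [a]) +
            (if arr[m - kn]'(by omega) ∈ (arr.take m).drop (m - kn + 1) ++ [a] then 0 else 1) := by
          rw [hWa]; exact pv_ndist_cons _ _
        by_cases hmem : arr[m - kn]'(by omega) ∈ (arr.take m).drop (m - kn + 1) ++ [a]
        · have h1 : ((arr.take m).drop (m - kn + 1) ++ [a]).count (arr[m - kn]'(by omega)) ≠ 0 := by
            have := List.count_pos_iff.mpr hmem; omega
          have h2 : ((((arr.take m).drop (m - kn + 1) ++ [a]).count (arr[m - kn]'(by omega)) : Int) == 0) = false := by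
            rw [beq_eq_false_iff_ne]
            exact_mod_cast h1
          rw [h2]
          simp only [Bool.false_eq_true, if_false]
          rw [hsplit, if_pos hmem]
          ring
        · have h1 : ((arr.take m).drop (m - kn + 1) ++ [a]).count (arr[m - kn]'(by omega)) = 0 :=
            List.count_eq_zero.mpr hmem
          rw [h1]
          norm_num
          rw [hsplit, if_neg hmem]
          ring
      rw [hd2]
      have hwin : (arr.take (m+1)).drop (m+1-kn) = (arr.take m).drop (m - kn + 1) ++ [a] :=
        pv_win_succ_ge arr kn m hk hcase hmlt
      rw [hwin]
      have hrange : List.range (m+1+1-kn) = List.range (m+1-kn) ++ [m+1-kn] := by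
        rw [show m+1+1-kn = (m+1-kn)+1 by omega, List.range_succ]
      rw [hrange, List.map_append, List.map_singleton]
      have hg : (arr.drop (m+1-kn)).take kn = (arr.take m).drop (m - kn + 1) ++ [a] := by
        rw [← pv_win_take_drop arr kn (m+1) (by omega)]
        exact hwin
      rw [hg]
      refine ⟨_, rfl, ?_⟩
      intro v
      rw [PySem.Dict.getD_insert]
      by_cases hv : v = arr[m - kn]'(by omega)
      · subst hv
        rw [if_pos rfl]
      · rw [if_neg hv, hins v, hWa, List.count_cons]
        have h0 : (arr[m - kn]'(by omega) == v) = false := by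
          rw [beq_eq_false_iff_ne]; exact fun h => hv h.symm
        rw [h0]
        simp
    · -- no removal: m < kn
      have hif1 : ((kn : Int) ≤ (m : Int)) = False := by
        simp; omega
      simp only [hif1, if_false]
      have hins : ∀ v : Int, (C.insert a ((W.count a : Int) + 1)).getD v 0 = ((W ++ [a]).count v : Int) := by
        intro v
        rw [PySem.Dict.getD_insert]
        by_cases hv : v = a
        · subst hv; simp [List.count_append]
        · have h1 : ([a].count v) = 0 := by
            simp [List.count_singleton]
            exact fun h => hv h.symm
          simp [hv, hC v, List.count_append, h1]
      have hd1 : (if ((W.count a : Int) == 0) = true then pvNdist W + 1 else pvNdist W) = pvNdist (W ++ [a]) := by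
        rw [pv_ndist_append]
        by_cases hmem : a ∈ W
        · have h1 : W.count a ≠ 0 := by
            have := List.count_pos_iff.mpr hmem; omega
          have h2 : ((W.count a : Int) == 0) = false := by
            rw [beq_eq_false_iff_ne]
            exact_mod_cast h1
          simp [h2, hmem]
        · have h1 : W.count a = 0 := List.count_eq_zero.mpr hmem
          simp [h1, hmem]
      rw [hd1]
      have hwin : (arr.take (m+1)).drop (m+1-kn) = W ++ [a] :=
        pv_win_succ_lt arr kn m hmlt (by omega)
      rw [hwin]
      by_cases happ : kn = m + 1
      · have hif2 : ((kn : Int) - 1 ≤ (m : Int)) = True := by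
          simp; omega
        simp only [hif2, if_true]
        have h1 : m + 1 - kn = 0 := by omega
        have h2 : m + 1 + 1 - kn = 1 := by omega
        have hg : (arr.drop 0).take kn = W ++ [a] := by
          conv_lhs => rw [show (0:Nat) = m+1-kn from h1.symm]
          rw [← pv_win_take_drop arr kn (m+1) (by omega)]
          exact hwin
        rw [h1, h2, List.range_one, List.range_zero, List.map_singleton, List.map_nil, hg,
          List.nil_append]
        exact ⟨_, rfl, hins⟩
      · have hif2 : ((kn : Int) - 1 ≤ (m : Int)) = False := by
          simp; omega
        simp only [hif2, if_false]
        have h1 : m + 1 + 1 - kn = m + 1 - kn := by omega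
        rw [h1]
        exact ⟨_, rfl, hins⟩

-- ===== VERDICT (by name: the statement is the Claim_ definition above) =====
theorem countDistinctElements_spec : Claim_equal_countDistinctElements := by
  intro arr k _ hpre
  unfold Pre_countDistinctElements at hpre
  unfold Spec_countDistinctElements
  have hk : k = ((k.toNat : Nat) : Int) := by omega
  have hk1 : 1 ≤ k.toNat := by omega
  rw [hk, pv_A_eq arr k.toNat]
  obtain ⟨C, heq, -⟩ := pv_B_loop arr k.toNat hk1 arr.length le_rfl
  unfold countDistinctElements_alt
  simp only [PySem.List.len_eq]
  rw [heq]
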